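-- pv_equiv track=rewrite | github.com/rtmaww/X-Piece | bpe_eval/cal_coverage.py | tokenize_overlap
-- ===== SOURCE A (Python) =====
-- def tokenize_overlap(chars, vocab):
--     start = 0
--     sub_tokens = []
--     while start < len(chars):
--         end = len(chars)
--         while start < end:
--             substr = "".join(chars[start:end])
--             if start > 0:
--                 substr = "##" + substr
--             if substr in vocab:
--                 sub_tokens.append(substr)
--             end -= 1
--         start += 1
--     if sub_tokens == []:
--         return ["[UNK]"]
--     return sub_tokens
-- ===== SOURCE B (Python) =====
-- def tokenize_overlap(chars, vocab):
--     vocab_set = set(vocab)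
--     sub_tokens = []
--     for start in range(len(chars)):
--         acc = "##" if start > 0 else ""
--         matches = []
--         for piece in chars[start:]:
--             acc += piece
--             if acc in vocab_set:
--                 matches.append(acc)
--         sub_tokens.extend(reversed(matches))
--     return sub_tokens if sub_tokens else ["[UNK]"]
-- ===== Notes on version B (the rewrite author's own statement) =====
-- stated objective: faster
-- what changed: Instead of A's decreasing-end inner loop that re-joins chars[start:end] from scratch and scans the vocab list for each (start,end) pair, B does one forward pass per start that extends an accumulator string by one piece at a time, tests membership in a prebuilt set(vocab), and reverses each start's matches to recover A's decreasing-end emission order.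
import Mathlib
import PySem

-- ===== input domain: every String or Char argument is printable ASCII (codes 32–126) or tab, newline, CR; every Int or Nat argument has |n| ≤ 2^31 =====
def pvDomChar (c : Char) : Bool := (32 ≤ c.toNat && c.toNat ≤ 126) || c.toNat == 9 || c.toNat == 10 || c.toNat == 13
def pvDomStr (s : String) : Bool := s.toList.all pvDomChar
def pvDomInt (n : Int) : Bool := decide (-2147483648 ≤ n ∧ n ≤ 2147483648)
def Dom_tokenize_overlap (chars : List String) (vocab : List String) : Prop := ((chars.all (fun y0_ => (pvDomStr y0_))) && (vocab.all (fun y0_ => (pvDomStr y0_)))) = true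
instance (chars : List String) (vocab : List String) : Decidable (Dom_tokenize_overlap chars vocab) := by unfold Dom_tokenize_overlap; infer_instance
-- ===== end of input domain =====

-- B replaces A's backward rescan (a fresh join of chars[start:end] for every end) by one forward
-- accumulating pass per start over set(vocab), reversing each start's matches; objective: faster.

-- ===== PORT A =====
-- A-side: the inner 'while start < end: … end -= 1' loop, recursion on end
def pvInnerA (chars : List String) (vocab : List String) (start : Nat) : Nat → List String
  | 0 => []
  | e + 1 =>
    if start < e + 1 then
      let substr := String.join (PySem.List.slice chars (some (start : Int)) (some ((e + 1 : Nat) : Int)))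
      let substr := if start > 0 then "##" ++ substr else substr
      (if substr ∈ vocab then [substr] else []) ++ pvInnerA chars vocab start e
    else []

-- A-side: the outer 'while start < len(chars)' loop
def pvOuterA (chars : List String) (vocab : List String) (start : Nat) : List String :=
  if start < chars.length then
    pvInnerA chars vocab start chars.length ++ pvOuterA chars vocab (start + 1)
  else []
termination_by chars.length - start

def tokenize_overlap (chars : List String) (vocab : List String) : List String :=
  let sub_tokens := pvOuterA chars vocab 0
  if sub_tokens = [] then ["[UNK]"] else sub_tokens

-- ===== PORT B =====
-- B-side: 'for piece in chars[start:]: acc += piece; if acc in vocab_set: matches.append(acc)'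
def pvForwardB (vs : PySem.Set String) (acc : String) : List String → List String
  | [] => []
  | piece :: rest =>
    let acc' := acc ++ piece
    (if PySem.Set.contains vs acc' then [acc'] else []) ++ pvForwardB vs acc' rest


-- 'chars[start:]' with 0 ≤ start is List.drop; 'range(len(chars))' is List.range
def tokenize_overlap_alt (chars : List String) (vocab : List String) : List String :=
  let vs := PySem.Set.ofList vocab
  let sub_tokens := (List.range chars.length).foldl
    (fun sub start =>
      sub ++ (pvForwardB vs (if start > 0 then "##" else "") (chars.drop start)).reverse) []
  if sub_tokens = [] then ["[UNK]"] else sub_tokens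

-- ===== PRECONDITION & SPEC =====
def Spec_tokenize_overlap (chars : List String) (vocab : List String) (out : List String) : Prop := out = tokenize_overlap_alt chars vocab
instance (chars : List String) (vocab : List String) (out : List String) : Decidable (Spec_tokenize_overlap chars vocab out) := by unfold Spec_tokenize_overlap; infer_instance

-- ===== CLAIM (what is proved, stated in full; the proofs are below) =====
def Claim_equal_tokenize_overlap : Prop := ∀ (chars : List String) (vocab : List String), Dom_tokenize_overlap chars vocab → Spec_tokenize_overlap chars vocab (tokenize_overlap chars vocab)

-- ===== LEMMAS AND PROOFS =====
theorem pv_foldl_append (l : List String) : ∀ (s t : String), List.foldl (· ++ ·) (s ++ t) l = s ++ List.foldl (· ++ ·) t l := by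
  induction l with
  | nil => intro s t; rfl
  | cons x l ih => intro s t; simp only [List.foldl_cons, String.append_assoc, ih]

theorem pv_join_cons (x : String) (l : List String) :
    String.join (x :: l) = x ++ String.join l := by
  have := pv_foldl_append l x ""
  simpa [String.join] using this

theorem pv_join_snoc (l : List String) (x : String) :
    String.join (l ++ [x]) = String.join l ++ x := by
  simp [String.join, List.foldl_append]

theorem pvForwardB_snoc (vs : PySem.Set String) (acc : String) (l : List String) (c : String) :
    pvForwardB vs acc (l ++ [c]) =
      pvForwardB vs acc l ++
        (if PySem.Set.contains vs (acc ++ String.join l ++ c)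
         then [acc ++ String.join l ++ c] else []) := by
  induction l generalizing acc with
  | nil => simp [pvForwardB, String.join]
  | cons p rest ih =>
      have hjoin : (acc ++ p) ++ String.join rest = acc ++ String.join (p :: rest) := by
        rw [pv_join_cons, String.append_assoc]
      simp only [List.cons_append, pvForwardB, ih, hjoin, List.append_assoc]

theorem pvInnerA_le (chars vocab : List String) (start e : Nat) (h : e ≤ start) :
    pvInnerA chars vocab start e = [] := by
  cases e with
  | zero => rfl
  | succ e => simp [pvInnerA]; omega

theorem pvInner_eq_rev (chars vocab : List String) (start : Nat) :
    ∀ (k : Nat), start + k ≤ chars.length →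
    pvInnerA chars vocab start (start + k) =
      (pvForwardB (PySem.Set.ofList vocab) (if start > 0 then "##" else "")
        ((chars.drop start).take k)).reverse := by
  intro k
  induction k with
  | zero =>
      intro _
      simp [pvInnerA_le chars vocab start start le_rfl, pvForwardB]
  | succ k ih =>
      intro hk
      have hk' : start + k ≤ chars.length := by omega
      have hklt : k < (chars.drop start).length := by
        simp only [List.length_drop]; omega
      show pvInnerA chars vocab start ((start + k) + 1) = _
      rw [pvInnerA, if_pos (by omega), PySem.List.slice_natCast]
      have hsub : start + k + 1 - start = k + 1 := by omega
      rw [hsub, ih hk', List.take_add_one, List.getElem?_eq_getElem hklt]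
      simp only [Option.toList_some]
      rw [pvForwardB_snoc, List.reverse_append]
      have hx : (if start > 0 then "##" ++ String.join ((chars.drop start).take k ++ [(chars.drop start)[k]]) else String.join ((chars.drop start).take k ++ [(chars.drop start)[k]]))
          = (if start > 0 then "##" else "") ++ String.join ((chars.drop start).take k) ++ (chars.drop start)[k] := by
        rw [pv_join_snoc]
        split
        · rw [String.append_assoc]
        · rw [String.empty_append]
      rw [← hx]
      congr 1
      by_cases hmem : (if start > 0 then "##" ++ String.join ((chars.drop start).take k ++ [(chars.drop start)[k]]) else String.join ((chars.drop start).take k ++ [(chars.drop start)[k]])) ∈ vocab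
      · have hc : PySem.Set.contains (PySem.Set.ofList vocab) (if start > 0 then "##" ++ String.join ((chars.drop start).take k ++ [(chars.drop start)[k]]) else String.join ((chars.drop start).take k ++ [(chars.drop start)[k]])) = true := by
          rw [PySem.Set.contains_iff]
          exact (PySem.Set.mem_ofList _ _).mpr hmem
        rw [if_pos hmem, if_pos hc]
        rfl
      · have hc : PySem.Set.contains (PySem.Set.ofList vocab) (if start > 0 then "##" ++ String.join ((chars.drop start).take k ++ [(chars.drop start)[k]]) else String.join ((chars.drop start).take k ++ [(chars.drop start)[k]])) ≠ true := by
          rw [Ne, PySem.Set.contains_iff]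
          intro hc
          exact hmem ((PySem.Set.mem_ofList _ _).mp hc)
        rw [if_neg hmem, if_neg hc]
        rfl

-- instantiate the per-start agreement at the full suffix chars[start:]
theorem pvInner_eq_rev' (chars vocab : List String) (start : Nat)
    (h : start < chars.length) :
    pvInnerA chars vocab start chars.length =
      (pvForwardB (PySem.Set.ofList vocab) (if start > 0 then "##" else "")
        (chars.drop start)).reverse := by
  have := pvInner_eq_rev chars vocab start (chars.length - start) (by omega)
  rw [Nat.add_sub_cancel' (le_of_lt h)] at this
  rw [this, List.take_of_length_le (by simp)]

-- A's outer while-loop as a flatMap over the remaining start positions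
theorem pvOuter_eq_flatMap (chars vocab : List String) :
    ∀ (fuel start : Nat), chars.length - start = fuel →
    pvOuterA chars vocab start =
      (List.range' start (chars.length - start)).flatMap
        (fun s => pvInnerA chars vocab s chars.length) := by
  intro fuel
  induction fuel with
  | zero =>
      intro start h
      rw [pvOuterA]
      simp [h, show ¬ start < chars.length by omega]
  | succ f ih =>
      intro start h
      rw [pvOuterA]
      have hlt : start < chars.length := by omega
      rw [if_pos hlt, ih (start + 1) (by omega), h,
        List.range'_succ, List.flatMap_cons]
      have hf : chars.length - (start + 1) = f := by omega
      rw [hf]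

-- ===== VERDICT (by name: the statement is the Claim_ definition above) =====
theorem tokenize_overlap_spec : Claim_equal_tokenize_overlap := by
  intro chars vocab _
  unfold Spec_tokenize_overlap tokenize_overlap tokenize_overlap_alt
  have : pvOuterA chars vocab 0 =
      (List.range chars.length).foldl
        (fun sub start =>
          sub ++ (pvForwardB (PySem.Set.ofList vocab)
            (if start > 0 then "##" else "") (chars.drop start)).reverse) [] := by
    rw [PySem.List.foldl_append_eq_flatMap, List.nil_append,
      pvOuter_eq_flatMap chars vocab (chars.length - 0) 0 rfl]
    simp only [Nat.sub_zero, List.range_eq_range']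
    apply List.flatMap_congr
    intro s hs
    exact pvInner_eq_rev' chars vocab s (by simpa using (List.mem_range'_1.mp hs).2)
  simp only [this]
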